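-- pv_equiv track=rewrite | github.com/jumtra/agenda_maker | agenda_maker/model/segmentation/model_bert.py | _get_list_text
-- ===== SOURCE A (Python) =====
-- def _get_list_text(list_segmented_text: list, list_label: list) -> list:
--     """類似ラベルを元に文章の結合"""
--
--     list_text = []
--     texts = list_segmented_text[0]
--     for i in range(len(list_label)):
--         if list_label[i]:
--             texts += list_segmented_text[i + 1]
--         else:
--             list_text.append(texts)
--             texts = list_segmented_text[i + 1]
--     if len(list_text) == 0:
--         return [texts]
--     else:
--         list_text.append(texts)
--         return list_text
-- ===== SOURCE B (Python) =====
-- def _get_list_text(list_segmented_text: list, list_label: list) -> list: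
--     """類似ラベルを元に文章の結合"""
--     list_text = []
--     start = 0
--     for i, label in enumerate(list_label):
--         if not label:
--             list_text.append("".join(list_segmented_text[j] for j in range(start, i + 1)))
--             start = i + 1
--     list_text.append("".join(list_segmented_text[j] for j in range(start, len(list_label) + 1)))
--     return list_text
-- ===== Notes on version B (the rewrite author's own statement) =====
-- stated objective: alternative
-- what changed: B records group-start boundaries while scanning the labels and emits each merged text as one ''.join over the indexed segment range of the group, instead of A's incremental string accumulation with a separate empty-result special case.
import Mathlib
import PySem

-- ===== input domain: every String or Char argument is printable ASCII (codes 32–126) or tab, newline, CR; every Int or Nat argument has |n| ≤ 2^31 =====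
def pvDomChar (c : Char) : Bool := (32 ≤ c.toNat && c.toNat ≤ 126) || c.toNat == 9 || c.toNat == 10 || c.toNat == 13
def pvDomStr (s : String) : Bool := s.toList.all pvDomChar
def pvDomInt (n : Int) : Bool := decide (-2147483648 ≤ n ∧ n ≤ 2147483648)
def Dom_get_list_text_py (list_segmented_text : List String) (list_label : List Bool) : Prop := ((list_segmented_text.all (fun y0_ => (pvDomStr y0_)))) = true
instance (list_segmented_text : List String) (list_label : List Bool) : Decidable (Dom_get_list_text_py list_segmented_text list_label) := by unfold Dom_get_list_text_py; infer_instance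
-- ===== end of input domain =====

-- B groups by label-run boundaries and emits each merged text as one join over the group's
-- indexed segment range, instead of A's incremental accumulation with its empty-result special
-- case (an alternative decomposition, no speed claim); equivalence is about return values (on
-- list-valued segments A's '+=' would mutate an element in place; under this file's type
-- convention segments are strings).

-- ===== PORT A =====
def get_list_text_py (list_segmented_text : List String) (list_label : List Bool) : List String :=
  let texts0 := PySem.List.pyGetD list_segmented_text 0 ""
  let st := (PySem.List.pyRange 0 (list_label.length : Int) 1).foldl
    (fun (st : List String × String) i =>
      if PySem.List.pyGetD list_label i false = true then
        (st.1, st.2 ++ PySem.List.pyGetD list_segmented_text (i + 1) "")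
      else
        (st.1 ++ [st.2], PySem.List.pyGetD list_segmented_text (i + 1) ""))
    ([], texts0)
  if st.1.length = 0 then [st.2] else st.1 ++ [st.2]

-- ===== PORT B =====
def get_list_text_py_alt (list_segmented_text : List String) (list_label : List Bool) : List String :=
  let st := (PySem.List.enumerate list_label 0).foldl
    (fun (st : List String × Int) p =>
      if p.2 = false then
        (st.1 ++ [PySem.Str.join "" ((PySem.List.pyRange st.2 (p.1 + 1) 1).map (fun j => PySem.List.pyGetD list_segmented_text j ""))], p.1 + 1)
      else st)
    ([], 0)
  st.1 ++ [PySem.Str.join "" ((PySem.List.pyRange st.2 ((list_label.length : Int) + 1) 1).map (fun j => PySem.List.pyGetD list_segmented_text j ""))]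

-- ===== PRECONDITION & SPEC =====
-- A reads list_segmented_text[0] and list_segmented_text[i+1] for every label index i, so it
-- raises IndexError exactly when the segment list is not longer than the label list.
def Pre_get_list_text_py (list_segmented_text : List String) (list_label : List Bool) : Prop :=
  list_label.length < list_segmented_text.length
instance (list_segmented_text : List String) (list_label : List Bool) : Decidable (Pre_get_list_text_py list_segmented_text list_label) := by unfold Pre_get_list_text_py; infer_instance
def pvWitness_get_list_text_py : List String × List Bool := (["ab", "cd", "e"], [true, false])

def Spec_get_list_text_py (list_segmented_text : List String) (list_label : List Bool) (out : List String) : Prop := out = get_list_text_py_alt list_segmented_text list_label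
instance (list_segmented_text : List String) (list_label : List Bool) (out : List String) : Decidable (Spec_get_list_text_py list_segmented_text list_label out) := by unfold Spec_get_list_text_py; infer_instance

-- ===== CLAIM (what is proved, stated in full; the proofs are below) =====
def Claim_equal_get_list_text_py : Prop := ∀ (list_segmented_text : List String) (list_label : List Bool), Dom_get_list_text_py list_segmented_text list_label → Pre_get_list_text_py list_segmented_text list_label → Spec_get_list_text_py list_segmented_text list_label (get_list_text_py list_segmented_text list_label)
-- ===== LEMMAS AND PROOFS =====

theorem jApp (l : List String) (x : String) :
    PySem.Str.join "" (l ++ [x]) = PySem.Str.join "" l ++ x := by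
  induction l with
  | nil => simp [PySem.Str.join]
  | cons a l ih =>
    cases l with
    | nil => simp [PySem.Str.join, PySem.Chars.join_cons_cons]
    | cons b l =>
      have : (a :: b :: l) ++ [x] = a :: ((b :: l) ++ [x]) := rfl
      rw [this]
      have h1 : PySem.Str.join "" (a :: ((b :: l) ++ [x])) = a ++ PySem.Str.join "" ((b :: l) ++ [x]) := by
        simp [PySem.Str.join, PySem.Chars.join_cons_cons]
      have h2 : PySem.Str.join "" (a :: b :: l) = a ++ PySem.Str.join "" (b :: l) := by
        simp [PySem.Str.join, PySem.Chars.join_cons_cons]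
      rw [h1, ih, h2, String.append_assoc]

theorem sliceSingle (ts : List String) (s : Nat) (h : s < ts.length) :
    PySem.List.slice ts (some (s:Int)) (some ((s:Int)+1)) = [ts[s]] := by
  have h1 : ((s:Int)+1) = ((s+1 : Nat) : Int) := by push_cast; ring
  rw [h1, PySem.List.slice_natCast]
  have : s + 1 - s = 1 := by omega
  rw [this]
  rw [List.drop_eq_getElem_cons h]
  rfl

theorem sliceExtend (ts : List String) (g e : Nat) (hg : g ≤ e) (he : e < ts.length) :
    PySem.List.slice ts (some (g:Int)) (some ((e:Int)+1))
      = PySem.List.slice ts (some (g:Int)) (some (e:Int)) ++ [ts[e]] := by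
  have h1 : ((e:Int)+1) = ((e+1 : Nat) : Int) := by push_cast; ring
  rw [h1, PySem.List.slice_natCast, PySem.List.slice_natCast]
  have h2 : e + 1 - g = (e - g) + 1 := by omega
  rw [h2, List.take_add_one]
  congr 1
  have h3 : g + (e - g) < ts.length := by omega
  rw [List.getElem?_drop]
  have h4 : g + (e - g) = e := by omega
  simp [h4, List.getElem?_eq_getElem he]

def stepZ (st : List String × String) (p : Bool × String) : List String × String :=
  if p.1 = true then (st.1, st.2 ++ p.2) else (st.1 ++ [st.2], p.2)

theorem stepA1 (ls : List Bool) (ts : List String) (h : ls.length < ts.length) (init : List String × String) :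
    (PySem.List.pyRange 0 (ls.length : Int) 1).foldl
      (fun (st : List String × String) i =>
        if PySem.List.pyGetD ls i false = true then
          (st.1, st.2 ++ PySem.List.pyGetD ts (i + 1) "")
        else
          (st.1 ++ [st.2], PySem.List.pyGetD ts (i + 1) "")) init
    = (ls.zip ts.tail).foldl stepZ init := by
  have hlen : (ls.zip ts.tail).length = ls.length := by
    simp [List.length_zip, List.length_tail]; omega
  have hbound : (ls.length : Int) = PySem.List.len (ls.zip ts.tail) := by
    simp [PySem.List.len, hlen]
  rw [hbound]
  have hcongr : ∀ (acc : List String × String), ∀ i ∈ PySem.List.pyRange 0 (PySem.List.len (ls.zip ts.tail)),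
      (fun (st : List String × String) (i : Int) =>
        if PySem.List.pyGetD ls i false = true then
          (st.1, st.2 ++ PySem.List.pyGetD ts (i + 1) "")
        else
          (st.1 ++ [st.2], PySem.List.pyGetD ts (i + 1) "")) acc i
      = (fun (st : List String × String) (i : Int) => stepZ st (PySem.List.pyGetD (ls.zip ts.tail) i (false, ""))) acc i := by
    intro acc i hi
    dsimp only
    have hm := (PySem.List.mem_pyRange_one).mp hi
    have h0 : (0:Int) ≤ i := hm.1
    have h1 : i < PySem.List.len (ls.zip ts.tail) := hm.2
    simp only [PySem.List.len] at h1
    have hz : i.toNat < (ls.zip ts.tail).length := by omega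
    have hl : i.toNat < ls.length := by omega
    have htt : i.toNat < ts.tail.length := by simp [List.length_tail]; omega
    have ht : (i+1).toNat < ts.length := by omega
    rw [PySem.List.pyGetD_eq_getElem ls _ h0 (by omega)]
    rw [PySem.List.pyGetD_eq_getElem ts _ (by omega : (0:Int) ≤ i + 1) (by omega)]
    rw [PySem.List.pyGetD_eq_getElem (ls.zip ts.tail) _ h0 (by omega)]
    have hzg : (ls.zip ts.tail)[i.toNat] = (ls[i.toNat], ts.tail[i.toNat]) := by
      simp [List.getElem_zip]
    have htg : ts[(i+1).toNat] = ts.tail[i.toNat] := by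
      have he : (i+1).toNat = i.toNat + 1 := by omega
      rw [List.getElem_tail]
      congr 1
    rw [hzg, htg]
    simp [stepZ]
  rw [PySem.List.foldl_congr_mem _ _ _ init hcongr]
  exact PySem.List.foldl_pyRange_zero_pyGetD (ls.zip ts.tail) (false, "") stepZ init

def pvGroups : List Bool → List String → String → List String
  | [], _, acc => [acc]
  | _ :: _, [], acc => [acc]
  | true :: ls, t :: ts, acc => pvGroups ls ts (acc ++ t)
  | false :: ls, t :: ts, acc => acc :: pvGroups ls ts t

theorem stepA2 (ls : List Bool) : ∀ (us : List String), ls.length ≤ us.length → ∀ (lt : List String) (acc : String),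
    (let st := (ls.zip us).foldl stepZ (lt, acc); st.1 ++ [st.2]) = lt ++ pvGroups ls us acc := by
  induction ls with
  | nil => intro us h lt acc; simp [pvGroups]
  | cons b ls ih =>
    intro us h lt acc
    cases us with
    | nil => simp at h
    | cons u us =>
      cases b with
      | true =>
        simp only [List.zip_cons_cons, List.foldl_cons, stepZ, pvGroups]
        exact ih us (by simpa using h) lt (acc ++ u)
      | false =>
        simp only [List.zip_cons_cons, List.foldl_cons, stepZ, pvGroups]
        have := ih us (by simpa using h) (lt ++ [acc]) u
        simp only [List.append_assoc, List.cons_append, List.nil_append] at this ⊢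
        simpa using this

def JS (ts : List String) (g e : Nat) : String :=
  PySem.Str.join "" (PySem.List.slice ts (some (g:Int)) (some (e:Int)))

theorem JS_extend (ts : List String) (g e : Nat) (hg : g ≤ e) (he : e < ts.length) :
    JS ts g (e+1) = JS ts g e ++ ts[e] := by
  unfold JS
  have h1 : ((e+1 : Nat) : Int) = (e:Int) + 1 := by push_cast; ring
  rw [h1, sliceExtend ts g e hg he, jApp]

theorem JS_single (ts : List String) (s : Nat) (h : s < ts.length) :
    JS ts s (s+1) = ts[s] := by
  unfold JS
  have h1 : ((s+1 : Nat) : Int) = (s:Int) + 1 := by push_cast; ring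
  rw [h1, sliceSingle ts s h]
  simp [PySem.Str.join]

def stepB (ts : List String) (st : List String × Int) (p : Int × Bool) : List String × Int :=
  if p.2 = false then
    (st.1 ++ [PySem.Str.join "" ((PySem.List.pyRange st.2 (p.1 + 1) 1).map (fun j => PySem.List.pyGetD ts j ""))], p.1 + 1)
  else st

theorem mapRange (ts : List String) (b : Nat) (hb : b ≤ ts.length) :
    ∀ (a : Nat), (PySem.List.pyRange (a:Int) (b:Int) 1).map (fun j => PySem.List.pyGetD ts j "")
      = PySem.List.slice ts (some (a:Int)) (some (b:Int)) := by
  suffices H : ∀ (n a : Nat), b - a ≤ n →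
      (PySem.List.pyRange (a:Int) (b:Int) 1).map (fun j => PySem.List.pyGetD ts j "")
        = PySem.List.slice ts (some (a:Int)) (some (b:Int)) by
    intro a; exact H (b - a) a le_rfl
  intro n
  induction n with
  | zero =>
    intro a ha
    have hba : b ≤ a := by omega
    have hnil : PySem.List.pyRange (a:Int) (b:Int) 1 = [] := by
      rw [List.eq_nil_iff_forall_not_mem]
      intro x hx
      have := PySem.List.mem_pyRange_one.mp hx
      omega
    rw [hnil, PySem.List.slice_natCast]
    have : b - a = 0 := by omega
    simp [this]
  | succ n ih =>
    intro a ha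
    by_cases hab : a < b
    · have hcons : PySem.List.pyRange (a:Int) (b:Int) 1 = (a:Int) :: PySem.List.pyRange ((a:Int)+1) (b:Int) 1 := by
        exact PySem.List.pyRange_one_cons (by exact_mod_cast hab)
      have haL : a < ts.length := by omega
      have hga : PySem.List.pyGetD ts (a:Int) "" = ts[a]'haL := by
        have := PySem.List.pyGetD_eq_getElem ts (i := (a:Int)) "" (by omega) (by exact_mod_cast haL)
        simpa using this
      have hcast : ((a:Int)+1) = ((a+1 : Nat):Int) := by push_cast; ring
      rw [hcons, List.map_cons, hga, hcast, ih (a+1) (by omega)]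
      rw [PySem.List.slice_natCast, PySem.List.slice_natCast]
      rw [List.drop_eq_getElem_cons haL]
      have h2 : b - a = (b - (a+1)) + 1 := by omega
      rw [h2, List.take_succ_cons]
    · have hba : b ≤ a := by omega
      have hnil : PySem.List.pyRange (a:Int) (b:Int) 1 = [] := by
        rw [List.eq_nil_iff_forall_not_mem]
        intro x hx
        have := PySem.List.mem_pyRange_one.mp hx
        omega
      rw [hnil, PySem.List.slice_natCast]
      have : b - a = 0 := by omega
      simp [this]

theorem stepB1 (ts : List String) : ∀ (ls : List Bool) (i g : Nat) (out : List String),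
    g ≤ i + 1 → i + ls.length < ts.length →
    (let st := (PySem.List.enumerate ls ((i:Nat):Int)).foldl (stepB ts) (out, (g:Int));
     st.1 ++ [PySem.Str.join "" ((PySem.List.pyRange st.2 (((i + ls.length : Nat):Int) + 1) 1).map (fun j => PySem.List.pyGetD ts j ""))])
    = out ++ pvGroups ls (ts.drop (i+1)) (JS ts g (i+1)) := by
  intro ls
  induction ls with
  | nil =>
    intro i g out hg hlen
    simp only [PySem.List.enumerate_nil, List.foldl_nil, List.length_nil, Nat.add_zero]
    have h1 : ((i : Nat) : Int) + 1 = ((i + 1 : Nat) : Int) := by push_cast; ring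
    rw [h1, mapRange ts (i+1) (by simp only [List.length_nil] at hlen; omega) g]
    simp [pvGroups, JS]
  | cons b ls ih =>
    intro i g out hg hlen
    have hcast : ((i:Nat):Int) + 1 = ((i+1 : Nat) : Int) := by push_cast; ring
    have hi1 : i + 1 < ts.length := by simp at hlen ⊢; omega
    have hdrop : ts.drop (i+1) = ts[i+1] :: ts.drop (i+2) := List.drop_eq_getElem_cons hi1
    rw [PySem.List.enumerate_cons]
    cases b with
    | true =>
      simp only [List.foldl_cons, stepB, if_neg (by decide : ¬(true = false))]
      have hb : ((i + (ls.length + 1) : Nat) : Int) = (((i+1) + ls.length : Nat) : Int) := by push_cast; ring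
      have := ih (i+1) g out (by omega) (by simp at hlen ⊢; omega)
      rw [hcast]
      simp only [List.length_cons, hb]
      rw [this, hdrop]
      simp only [pvGroups]
      rw [JS_extend ts g (i+1) hg hi1]
    | false =>
      simp only [List.foldl_cons, stepB, if_true]
      have hb : ((i + (ls.length + 1) : Nat) : Int) = (((i+1) + ls.length : Nat) : Int) := by push_cast; ring
      rw [hcast, mapRange ts (i+1) (by simp at hlen; omega) g]
      have := ih (i+1) (i+1) (out ++ [PySem.Str.join "" (PySem.List.slice ts (some (g:Int)) (some ((i+1 : Nat):Int)))]) (by omega) (by simp at hlen ⊢; omega)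
      simp only [List.length_cons, hb]
      rw [this, hdrop]
      simp only [pvGroups, JS_single ts (i+1) hi1]
      simp [JS, List.append_assoc]

theorem ifLen (l : List String) (x : String) :
    (if l.length = 0 then [x] else l ++ [x]) = l ++ [x] := by cases l <;> simp

theorem final (ts : List String) (ls : List Bool) (hlen : ls.length < ts.length) :
    get_list_text_py ts ls = get_list_text_py_alt ts ls := by
  have h0 : 0 < ts.length := by omega
  have htail : ls.length ≤ ts.tail.length := by simp [List.length_tail]; omega
  have hget0 : PySem.List.pyGetD ts 0 "" = ts[0]'h0 := by
    have := PySem.List.pyGetD_eq_getElem ts (i := 0) "" (by norm_num) (by exact_mod_cast h0)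
    simpa using this
  have hA : get_list_text_py ts ls = pvGroups ls ts.tail (ts[0]'h0) := by
    unfold get_list_text_py
    simp only [stepA1 ls ts hlen, hget0, ifLen]
    have := stepA2 ls ts.tail htail [] (ts[0]'h0)
    simpa using this
  have hB : get_list_text_py_alt ts ls = pvGroups ls ts.tail (ts[0]'h0) := by
    unfold get_list_text_py_alt
    have hfun : (fun (st : List String × Int) (p : Int × Bool) =>
        if p.2 = false then
          (st.1 ++ [PySem.Str.join "" ((PySem.List.pyRange st.2 (p.1 + 1) 1).map (fun j => PySem.List.pyGetD ts j ""))], p.1 + 1)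
        else st) = stepB ts := rfl
    have hb := stepB1 ts ls 0 0 [] (by omega) (by omega)
    simp only [Nat.cast_zero, zero_add, List.drop_one] at hb
    simp only [hfun]
    rw [hb, JS_single ts 0 h0]
    simp
  rw [hA, hB]

-- ===== VERDICT (by name: the statement is the Claim_ definition above) =====
theorem get_list_text_py_spec : Claim_equal_get_list_text_py := by
  intro ts ls _ hpre
  exact final ts ls hpre
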